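-- pv_equiv track=rewrite | github.com/adrian-mason/wperf | scripts/cascade_oracle.py | sweep_line_partition
-- ===== SOURCE A (Python) =====
-- def sweep_line_partition(outgoing, window_start, window_end):
--     """Decompose overlapping edges into non-overlapping elementary intervals."""
--     clipped = []
--     for dst, e_start, e_end in outgoing:
--         # Clip to window
--         s = max(e_start, window_start)
--         e = min(e_end, window_end)
--         if s < e:
--             clipped.append((dst, s, e))
--
--     if not clipped:
--         return []
--
--     # Collect boundary points
--     points = sorted(set(
--         p for _, s, e in clipped for p in (s, e)
--     ))
--
--     intervals = []
--     for i in range(len(points) - 1):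
--         s, e = points[i], points[i + 1]
--         if s >= e:
--             continue
--         targets = sorted(set(
--             dst for dst, cs, ce in clipped if cs <= s and ce >= e
--         ))
--         if targets:
--             intervals.append((s, e, targets))
--
--     return intervals
-- ===== SOURCE B (Python) =====
-- def sweep_line_partition(outgoing, window_start, window_end):
--     """Sweep line: sort clipped edges by start, keep an incremental active list
--     (append on start, prune expired) instead of rescanning all edges per interval."""
--     clipped = [(dst, max(s, window_start), min(e, window_end))
--                for dst, s, e in outgoing
--                if max(s, window_start) < min(e, window_end)]
--     if not clipped:
--         return []
--     points = sorted({p for _, s, e in clipped for p in (s, e)})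
--     by_start = sorted(clipped, key=lambda t: t[1])
--     intervals = []
--     active = []
--     idx = 0
--     for s, e in zip(points, points[1:]):
--         while idx < len(by_start) and by_start[idx][1] <= s:
--             active.append(by_start[idx])
--             idx += 1
--         active = [t for t in active if t[2] >= e]
--         if active:
--             intervals.append((s, e, sorted({dst for dst, _, _ in active})))
--     return intervals
-- ===== Notes on version B (the rewrite author's own statement) =====
-- stated objective: faster
-- what changed: Replaces the per-interval rescan of all clipped edges with a sweep over start-sorted edges that maintains an incremental active list (append edges whose start is reached, prune expired ones), so each elementary interval only touches its own active edges.
import Mathlib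
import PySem

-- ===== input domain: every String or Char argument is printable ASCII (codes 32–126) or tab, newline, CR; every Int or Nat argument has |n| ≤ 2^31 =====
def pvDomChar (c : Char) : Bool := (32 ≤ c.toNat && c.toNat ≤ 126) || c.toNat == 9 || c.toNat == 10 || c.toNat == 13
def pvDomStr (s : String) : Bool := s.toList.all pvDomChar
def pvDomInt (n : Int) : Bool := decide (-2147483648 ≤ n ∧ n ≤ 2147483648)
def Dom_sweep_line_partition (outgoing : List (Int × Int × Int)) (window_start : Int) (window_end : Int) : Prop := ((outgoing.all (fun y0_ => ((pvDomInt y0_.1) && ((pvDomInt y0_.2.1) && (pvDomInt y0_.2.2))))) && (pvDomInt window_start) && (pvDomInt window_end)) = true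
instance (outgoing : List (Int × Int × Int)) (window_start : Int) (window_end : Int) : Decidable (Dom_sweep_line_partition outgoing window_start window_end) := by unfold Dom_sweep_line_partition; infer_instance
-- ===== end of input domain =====

-- B replaces A's per-interval rescan of all clipped edges by a start-sorted sweep with an
-- incremental active list (objective: faster — fewer edge visits per elementary interval).

-- ===== PORT A =====
def sweep_line_partition (outgoing : List (Int × Int × Int)) (window_start : Int) (window_end : Int) : List (Int × Int × List Int) :=
  let clipped := outgoing.foldl (fun acc t =>
    let s := max t.2.1 window_start
    let e := min t.2.2 window_end
    if s < e then acc ++ [(t.1, s, e)] else acc) []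
  if clipped = [] then []
  else
    let points := PySem.List.sorted (PySem.Set.ofList (clipped.flatMap (fun t => [t.2.1, t.2.2]))) (fun x => x) false
    (List.range (points.length - 1)).foldl (fun intervals i =>
      let s := points.getD i 0
      let e := points.getD (i + 1) 0
      if s ≥ e then intervals
      else
        let targets := PySem.List.sorted
          (PySem.Set.ofList ((clipped.filter (fun t => decide (t.2.1 ≤ s ∧ e ≤ t.2.2))).map (fun t => t.1)))
          (fun x => x) false
        if targets = [] then intervals else intervals ++ [(s, e, targets)]) []

-- ===== PORT B =====
-- one sweep step: consume edges whose start has been reached (the Python while-loop: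
-- the index into by_start is modelled by the remaining suffix), prune expired, emit
def pvAltStep (st : List (Int × Int × Int) × List (Int × Int × Int) × List (Int × Int × List Int))
    (p : Int × Int) : List (Int × Int × Int) × List (Int × Int × Int) × List (Int × Int × List Int) :=
  let newly := st.2.1.takeWhile (fun t => decide (t.2.1 ≤ p.1))
  let remaining := st.2.1.dropWhile (fun t => decide (t.2.1 ≤ p.1))
  let active := (st.1 ++ newly).filter (fun t => decide (p.2 ≤ t.2.2))
  if active = [] then (active, remaining, st.2.2)
  else (active, remaining,
    st.2.2 ++ [(p.1, p.2, PySem.List.sorted (PySem.Set.ofList (active.map (fun t => t.1))) (fun x => x) false)])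

def sweep_line_partition_alt (outgoing : List (Int × Int × Int)) (window_start : Int) (window_end : Int) : List (Int × Int × List Int) :=
  let clipped := outgoing.filterMap (fun t =>
    if max t.2.1 window_start < min t.2.2 window_end
    then some (t.1, max t.2.1 window_start, min t.2.2 window_end) else none)
  if clipped = [] then []
  else
    let points := PySem.List.sorted (PySem.Set.ofList (clipped.flatMap (fun t => [t.2.1, t.2.2]))) (fun x => x) false
    let by_start := PySem.List.sorted clipped (fun t => t.2.1) false
    ((points.zip points.tail).foldl pvAltStep ([], by_start, [])).2.2

-- ===== PRECONDITION & SPEC =====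
def Spec_sweep_line_partition (outgoing : List (Int × Int × Int)) (window_start : Int) (window_end : Int) (out : List (Int × Int × List Int)) : Prop := out = sweep_line_partition_alt outgoing window_start window_end
instance (outgoing : List (Int × Int × Int)) (window_start : Int) (window_end : Int) (out : List (Int × Int × List Int)) : Decidable (Spec_sweep_line_partition outgoing window_start window_end out) := by unfold Spec_sweep_line_partition; infer_instance

-- ===== CLAIM (what is proved, stated in full; the proofs are below) =====
def Claim_equal_sweep_line_partition : Prop := ∀ (outgoing : List (Int × Int × Int)) (window_start : Int) (window_end : Int), Dom_sweep_line_partition outgoing window_start window_end → Spec_sweep_line_partition outgoing window_start window_end (sweep_line_partition outgoing window_start window_end)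

-- ===== LEMMAS AND PROOFS =====

-- both clippings produce the same list
lemma pvClip_eq (ws we : Int) : ∀ (l : List (Int × Int × Int)) (acc : List (Int × Int × Int)),
    l.foldl (fun acc t =>
      let s := max t.2.1 ws
      let e := min t.2.2 we
      if s < e then acc ++ [(t.1, s, e)] else acc) acc
    = acc ++ l.filterMap (fun t =>
        if max t.2.1 ws < min t.2.2 we
        then some (t.1, max t.2.1 ws, min t.2.2 we) else none) := by
  intro l
  induction l with
  | nil => intro acc; simp
  | cons a t ih =>
    intro acc
    simp only [List.foldl_cons]
    by_cases h : max a.2.1 ws < min a.2.2 we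
    · rw [if_pos h, List.filterMap_cons_some
        (f := fun (t : Int × Int × Int) => if max t.2.1 ws < min t.2.2 we then some (t.1, max t.2.1 ws, min t.2.2 we) else none)
        (if_pos h), ih, List.append_assoc, List.singleton_append]
    · rw [if_neg h, List.filterMap_cons_none
        (f := fun (t : Int × Int × Int) => if max t.2.1 ws < min t.2.2 we then some (t.1, max t.2.1 ws, min t.2.2 we) else none)
        (if_neg h), ih]

-- sorted(set(·)) only depends on which elements occur
lemma pvSortedSet_perm {l l' : List Int} (h : l.Perm l') :
    PySem.List.sorted (PySem.Set.ofList l) (fun x => x) false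
      = PySem.List.sorted (PySem.Set.ofList l') (fun x => x) false := by
  apply PySem.List.sorted_eq_sorted_of_perm _ _ _ (fun a b hab => hab)
  rw [List.perm_ext_iff_of_nodup (PySem.Set.nodup_ofList l) (PySem.Set.nodup_ofList l')]
  intro a
  rw [PySem.Set.mem_ofList, PySem.Set.mem_ofList]
  exact ⟨fun ha => h.mem_iff.mp ha, fun ha => h.symm.mem_iff.mp ha⟩

lemma pvSortedSet_nil_iff (l : List Int) :
    PySem.List.sorted (PySem.Set.ofList l) (fun x => x) false = [] ↔ l = [] := by
  rw [PySem.List.sorted_eq_nil_iff]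
  constructor
  · intro h
    cases l with
    | nil => rfl
    | cons a t =>
      exfalso
      have ha : a ∈ PySem.Set.ofList (a :: t) := (PySem.Set.mem_ofList (a :: t) a).mpr (by simp)
      rw [h] at ha
      simp at ha
  · intro h; subst h; rfl

-- the covering targets of one elementary interval
def pvTgt (c : List (Int × Int × Int)) (s e : Int) : List Int :=
  PySem.List.sorted
    (PySem.Set.ofList ((c.filter (fun t => decide (t.2.1 ≤ s ∧ e ≤ t.2.2))).map (fun t => t.1)))
    (fun x => x) false

lemma pvTgt_perm {c c' : List (Int × Int × Int)} (h : c.Perm c') (s e : Int) :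
    pvTgt c s e = pvTgt c' s e := by
  unfold pvTgt
  exact pvSortedSet_perm ((h.filter _).map _)

-- A's loop body, named
def pvAStep (c : List (Int × Int × Int)) (a : List (Int × Int × List Int)) (s e : Int) :
    List (Int × Int × List Int) :=
  if s ≥ e then a
  else if pvTgt c s e = [] then a else a ++ [(s, e, pvTgt c s e)]

-- the spec-level step shared by both sides: emit the interval with its covering targets
def pvSpecStep (c : List (Int × Int × Int)) (acc : List (Int × Int × List Int)) (p : Int × Int) :
    List (Int × Int × List Int) :=
  if pvTgt c p.1 p.2 = [] then acc else acc ++ [(p.1, p.2, pvTgt c p.1 p.2)]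

-- an index loop over adjacent entries is the fold over zipped adjacent pairs
lemma pvRangeFoldZip {α β : Type} (l : List β) (d : β) (f : α → β → β → α) (init : α) :
    (List.range (l.length - 1)).foldl (fun a i => f a (l.getD i d) (l.getD (i + 1) d)) init
      = (l.zip l.tail).foldl (fun a p => f a p.1 p.2) init := by
  have hz : l.zip l.tail = (List.range (l.length - 1)).map (fun i => (l.getD i d, l.getD (i + 1) d)) := by
    apply List.ext_getElem
    · simp
    · intro i h1 h2
      have hi : i < l.length - 1 := by simpa using h2
      have hi1 : i < l.length := by omega
      have hi2 : i + 1 < l.length := by omega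
      simp [List.getElem_zip, List.getElem_tail, List.getD_eq_getElem?_getD,
        List.getElem?_eq_getElem hi1, List.getElem?_eq_getElem hi2]
  rw [hz, List.foldl_map]

-- adjacent pairs of a strictly increasing list are strictly ordered
lemma pvZipPairLt : ∀ (l : List Int), l.Pairwise (· < ·) → ∀ p ∈ l.zip l.tail, p.1 < p.2 := by
  intro l
  induction l with
  | nil => simp
  | cons a t ih =>
    intro h p hp
    cases t with
    | nil => simp at hp
    | cons b t' =>
      simp only [List.tail_cons, List.zip_cons_cons, List.mem_cons] at hp
      rcases hp with rfl | hp'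
      · exact (List.pairwise_cons.mp h).1 b (by simp)
      · exact ih (List.pairwise_cons.mp h).2 p hp'

-- after dropWhile on a start-sorted list, every remaining start exceeds s
lemma pvDropWhileGt (s : Int) : ∀ (l : List (Int × Int × Int)),
    l.Pairwise (fun a b => a.2.1 ≤ b.2.1) →
    ∀ t ∈ l.dropWhile (fun t => decide (t.2.1 ≤ s)), ¬ t.2.1 ≤ s := by
  intro l
  induction l with
  | nil => simp
  | cons a l' ih =>
    intro h t ht
    by_cases ha : a.2.1 ≤ s
    · rw [List.dropWhile_cons_of_pos (by simpa using ha)] at ht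
      exact ih (List.pairwise_cons.mp h).2 t ht
    · rw [List.dropWhile_cons_of_neg (by simpa using ha)] at ht
      rcases List.mem_cons.mp ht with rfl | ht'
      · exact ha
      · intro hle
        exact ha (le_trans ((List.pairwise_cons.mp h).1 t ht') hle)

-- sweep invariant: active is exactly the not-yet-expired consumed edges
lemma pvAltInv (by_start : List (Int × Int × Int))
    (hs : by_start.Pairwise (fun a b => a.2.1 ≤ b.2.1)) :
    ∀ (q : List Int) (s : Int), (s :: q).Pairwise (· < ·) →
    ∀ (consumed remaining active : List (Int × Int × Int)) (acc : List (Int × Int × List Int)),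
      by_start = consumed ++ remaining →
      (∀ t ∈ consumed, t.2.1 ≤ s) →
      active = consumed.filter (fun t => decide (s ≤ t.2.2)) →
      (((s :: q).zip q).foldl pvAltStep (active, remaining, acc)).2.2
        = ((s :: q).zip q).foldl (pvSpecStep by_start) acc := by
  intro q
  induction q with
  | nil => intro s _ consumed remaining active acc _ _ _; simp
  | cons e q' ih =>
    intro s hpw consumed remaining active acc hsplit hcons hact
    have hse : s < e := (List.pairwise_cons.mp hpw).1 e (by simp)
    have hremsorted : remaining.Pairwise (fun a b => a.2.1 ≤ b.2.1) :=
      (List.pairwise_append.mp (hsplit ▸ hs)).2.1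
    -- names for the pieces of one step
    set newly := remaining.takeWhile (fun t => decide (t.2.1 ≤ s)) with hnew
    set remaining' := remaining.dropWhile (fun t => decide (t.2.1 ≤ s)) with hrem
    set active' := (active ++ newly).filter (fun t => decide (e ≤ t.2.2)) with hact'
    have hsplit' : by_start = (consumed ++ newly) ++ remaining' := by
      rw [hsplit, List.append_assoc, hnew, hrem, List.takeWhile_append_dropWhile]
    have hcons' : ∀ t ∈ consumed ++ newly, t.2.1 ≤ s := by
      intro t ht
      rcases List.mem_append.mp ht with h1 | h2
      · exact hcons t h1
      · simpa using List.mem_takeWhile_imp h2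
    have hactive' : active' = (consumed ++ newly).filter (fun t => decide (e ≤ t.2.2)) := by
      rw [hact', hact]
      simp only [List.filter_append, List.filter_filter]
      congr 1
      apply List.filter_congr
      intro t _
      by_cases h : e ≤ t.2.2
      · simp [h, le_trans (le_of_lt hse) h]
      · simp [h]
    have hfilter_by : by_start.filter (fun t => decide (t.2.1 ≤ s ∧ e ≤ t.2.2)) = active' := by
      rw [hsplit', List.filter_append, List.filter_append]
      have h1 : ∀ (c : List (Int × Int × Int)), (∀ t ∈ c, t.2.1 ≤ s) →
          c.filter (fun t => decide (t.2.1 ≤ s ∧ e ≤ t.2.2)) = c.filter (fun t => decide (e ≤ t.2.2)) := by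
        intro c hc
        apply List.filter_congr
        intro t ht
        simp [hc t ht]
      have h2 : remaining'.filter (fun t => decide (t.2.1 ≤ s ∧ e ≤ t.2.2)) = [] := by
        rw [List.filter_eq_nil_iff]
        intro t ht
        simp only [decide_eq_true_eq, not_and]
        intro hcs
        exact absurd hcs (pvDropWhileGt s remaining hremsorted t ht)
      rw [h1 consumed (fun t ht => hcons t ht), h1 newly (fun t ht => by simpa using List.mem_takeWhile_imp ht),
        h2, List.append_nil, hactive', List.filter_append]
    have htarg : pvTgt by_start s e
        = PySem.List.sorted (PySem.Set.ofList (active'.map (fun t => t.1))) (fun x => x) false := by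
      unfold pvTgt
      rw [hfilter_by]
    -- one pvAltStep step equals one pvSpecStep step (and sets up the next state)
    have hstep : pvAltStep (active, remaining, acc) (s, e)
        = (active', remaining', pvSpecStep by_start acc (s, e)) := by
      show (if active' = [] then (active', remaining', acc)
            else (active', remaining', acc ++ [(s, e, PySem.List.sorted (PySem.Set.ofList (active'.map (fun t => t.1))) (fun x => x) false)]))
          = (active', remaining', pvSpecStep by_start acc (s, e))
      unfold pvSpecStep
      by_cases hA : active' = []
      · have hT : pvTgt by_start (s, e).1 (s, e).2 = [] := by
          show pvTgt by_start s e = []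
          rw [htarg, pvSortedSet_nil_iff, List.map_eq_nil_iff]
          exact hA
        rw [if_pos hA, if_pos hT]
      · have hT : ¬ pvTgt by_start (s, e).1 (s, e).2 = [] := by
          show ¬ pvTgt by_start s e = []
          rw [htarg, pvSortedSet_nil_iff, List.map_eq_nil_iff]
          exact hA
        rw [if_neg hA, if_neg hT]
        show _ = (active', remaining', acc ++ [((s, e).1, (s, e).2, pvTgt by_start (s, e).1 (s, e).2)])
        rw [show pvTgt by_start (s, e).1 (s, e).2 = pvTgt by_start s e from rfl, htarg]
    calc (((s :: e :: q').zip (e :: q')).foldl pvAltStep (active, remaining, acc)).2.2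
        = (((e :: q').zip q').foldl pvAltStep (active', remaining', pvSpecStep by_start acc (s, e))).2.2 := by
          simp only [List.zip_cons_cons, List.foldl_cons, hstep]
      _ = ((e :: q').zip q').foldl (pvSpecStep by_start) (pvSpecStep by_start acc (s, e)) := by
          exact ih e (List.pairwise_cons.mp hpw).2 (consumed ++ newly) remaining' active'
            (pvSpecStep by_start acc (s, e)) hsplit'
            (fun t ht => le_of_lt (lt_of_le_of_lt (hcons' t ht) hse))
            hactive'
      _ = ((s :: e :: q').zip (e :: q')).foldl (pvSpecStep by_start) acc := by
          simp only [List.zip_cons_cons, List.foldl_cons]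

-- the non-empty case: A's index loop equals B's sweep
lemma pvCore (c : List (Int × Int × Int)) (points : List Int) (by_start : List (Int × Int × Int))
    (hpts : points = PySem.List.sorted (PySem.Set.ofList (c.flatMap (fun t => [t.2.1, t.2.2]))) (fun x => x) false)
    (hbs : by_start = PySem.List.sorted c (fun t => t.2.1) false) :
    (List.range (points.length - 1)).foldl
        (fun a i => pvAStep c a (points.getD i 0) (points.getD (i + 1) 0)) []
      = ((points.zip points.tail).foldl pvAltStep ([], by_start, [])).2.2 := by
  have hppw : points.Pairwise (· < ·) := by
    rw [hpts]; exact PySem.List.sorted_ofList_pairwise_lt _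
  have hperm : by_start.Perm c := by
    rw [hbs]; exact PySem.List.sorted_perm c (fun t => t.2.1) false
  have hbspw : by_start.Pairwise (fun a b => a.2.1 ≤ b.2.1) := by
    rw [hbs]; exact PySem.List.sorted_pairwise c (fun t => t.2.1)
  rw [pvRangeFoldZip points (0 : Int) (pvAStep c) []]
  rw [PySem.List.foldl_congr_mem (points.zip points.tail)
    (fun a p => pvAStep c a p.1 p.2) (pvSpecStep by_start) []
    (by
      intro acc p hp
      have hlt : p.1 < p.2 := pvZipPairLt points hppw p hp
      have hge : ¬ p.1 ≥ p.2 := not_le.mpr hlt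
      simp only [pvAStep, pvSpecStep]
      rw [if_neg hge, pvTgt_perm hperm.symm p.1 p.2])]
  cases hq : points with
  | nil => simp
  | cons s0 q =>
    rw [hq] at hppw
    simp only [List.tail_cons]
    exact (pvAltInv by_start hbspw q s0 hppw [] by_start [] [] rfl (by simp) (by simp)).symm

-- ===== VERDICT (by name: the statement is the Claim_ definition above) =====
theorem sweep_line_partition_spec : Claim_equal_sweep_line_partition := by
  intro outgoing ws we _
  unfold Spec_sweep_line_partition sweep_line_partition sweep_line_partition_alt
  rw [pvClip_eq ws we outgoing []]
  simp only [List.nil_append]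
  by_cases hnil : (outgoing.filterMap (fun t =>
      if max t.2.1 ws < min t.2.2 we
      then some (t.1, max t.2.1 ws, min t.2.2 we) else none)) = []
  · rw [if_pos hnil, if_pos hnil]
  · rw [if_neg hnil, if_neg hnil]
    exact pvCore _ _ _ rfl rfl
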